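-- pv_equiv track=rewrite | github.com/miniongo3o/TIL | programmers/1115_2.py | check
-- ===== SOURCE A (Python) =====
-- def check(string,arr,num,li):
--     # string이 주어진다.
--     # idx 이후의 arr값중에서,
--     # arr[idx]보다 크면 붙여서 리턴.
--
--     for i in arr:
--         if i>num:
--             a=string + str(i)
--             li.append(a)
--             idx=arr.index(i)
--             check(a,arr[idx:],arr[idx],li)
--
--     # li.sort(key=lambda x:len(x))
--     # length=len(li[-1])
--     # li=[ i for i in li if len(i)==length]
--     # li.sort()
--     return li
-- ===== SOURCE B (Python) =====
-- def check(string, arr, num, li):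
--     # Iterative DFS with an explicit stack instead of recursion; same pre-order output.
--     stack = []
--     for i in reversed(arr):
--         if i > num:
--             idx = arr.index(i)
--             stack.append((string + str(i), arr[idx:], arr[idx]))
--     while stack:
--         s, sub, t = stack.pop()
--         li.append(s)
--         for j in reversed(sub):
--             if j > t:
--                 jdx = sub.index(j)
--                 stack.append((s + str(j), sub[jdx:], sub[jdx]))
--     return li
-- ===== Notes on version B (the rewrite author's own statement) =====
-- stated objective: alternative
-- what changed: Replaced A's recursive DFS (recursion per element, Python call stack) by an iterative DFS with an explicit stack of (string, sub_arr, threshold) entries, pushing children in reverse so pre-order output is preserved.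
import Mathlib
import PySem

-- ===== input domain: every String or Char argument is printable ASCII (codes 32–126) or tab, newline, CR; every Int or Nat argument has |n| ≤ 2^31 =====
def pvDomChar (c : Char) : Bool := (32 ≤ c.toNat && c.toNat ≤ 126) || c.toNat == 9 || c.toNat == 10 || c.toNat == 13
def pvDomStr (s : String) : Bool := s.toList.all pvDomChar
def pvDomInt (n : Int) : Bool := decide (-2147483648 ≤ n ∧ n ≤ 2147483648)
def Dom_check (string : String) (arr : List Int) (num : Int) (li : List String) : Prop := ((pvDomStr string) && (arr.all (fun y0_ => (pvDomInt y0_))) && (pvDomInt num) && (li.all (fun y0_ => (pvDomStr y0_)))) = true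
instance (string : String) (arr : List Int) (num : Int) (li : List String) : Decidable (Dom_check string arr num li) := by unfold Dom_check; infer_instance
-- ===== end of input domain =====

-- B replaces A's recursive DFS by an iterative DFS over an explicit stack (objective: alternative,
-- same cost).  Both A and B append the emitted strings to the caller's list `li` in the same
-- order, so the observable mutation of `li` is identical; the theorems are about the return value.

-- helper lemmas needed by the ports' termination proofs (cited by name in decreasing_by)

theorem pvFilterLenMono (l : List Int) (i num : Int) (h : num < i) :
    (l.filter (fun x => decide (i < x))).length ≤ (l.filter (fun x => decide (num < x))).length := by
  induction l with
  | nil => simp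
  | cons x xs ih =>
    by_cases hx : i < x
    · have : num < x := lt_trans h hx
      simp [hx, this]; omega
    · by_cases hn : num < x <;> simp [hx, hn] <;> omega

-- the child subtree, rooted at the first occurrence of i, has strictly fewer elements
-- above its threshold i than the parent list has above num (for i > num)
theorem pvRankDropLt (arr : List Int) (i num : Int) (idx : Nat)
    (h1 : PySem.List.index? arr i = some idx) (hnum : num < i) :
    ((arr.drop idx).filter (fun x => decide (i < x))).length
      < (arr.filter (fun x => decide (num < x))).length := by
  obtain ⟨pre, suf, harr, hlen, -⟩ := (PySem.List.index?_eq_some_iff arr i idx).mp h1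
  subst harr
  subst hlen
  rw [List.drop_left]
  have hmono := pvFilterLenMono suf i num hnum
  simp [List.filter_append, List.filter_cons, hnum, lt_irrefl]
  omega

-- arr[idx] is i itself when idx = arr.index(i)
theorem pvGetIndexEq (arr : List Int) (i : Int) (idx : Nat) (thr : Int)
    (h1 : PySem.List.index? arr i = some idx) (h2 : PySem.List.pyGet? arr (idx : Int) = some thr) :
    thr = i := by
  obtain ⟨hk, hget, -⟩ := PySem.List.getElem_of_index?_eq_some h1
  rw [PySem.List.pyGet?_natCast, List.getElem?_eq_getElem hk] at h2
  simp at h2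
  omega

-- ===== PORT A =====
-- A's `for i in arr:` loop with a recursive call in its body, as a two-level recursion: `rest` is
-- the not-yet-visited tail of the loop, `arr` the full list (for arr.index(i), arr[idx:], arr[idx]).
-- The `none` branches are unreachable in every actual call (i is an element of arr, so arr.index(i)
-- succeeds and idx is in range; Python raises nothing there).
def checkAuxA (string : String) (arr : List Int) (rest : List Int) (num : Int) (li : List String) : List String :=
  match rest with
  | [] => li
  | i :: rest' =>
    if hnum : num < i then
      let a := string ++ PySem.Int.toStr i
      match h1 : PySem.List.index? arr i with
      | some idx =>
        match h2 : PySem.List.pyGet? arr (idx : Int) with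
        | some thr =>
          let sub := PySem.List.slice arr (some (idx : Int)) none
          let li' := checkAuxA a sub sub thr (li ++ [a])
          checkAuxA string arr rest' num li'
        | none => checkAuxA string arr rest' num li   -- unreachable
      | none => checkAuxA string arr rest' num li     -- unreachable
    else checkAuxA string arr rest' num li
termination_by ((arr.filter (fun x => decide (num < x))).length, rest.length)
decreasing_by
  · apply Prod.Lex.left
    have hthr := pvGetIndexEq arr i idx thr h1 h2
    subst hthr
    rw [PySem.List.slice_from_natCast]
    exact pvRankDropLt arr thr num idx h1 hnum
  · apply Prod.Lex.right; simp
  · apply Prod.Lex.right; simp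
  · apply Prod.Lex.right; simp
  · apply Prod.Lex.right; simp

def check (string : String) (arr : List Int) (num : Int) (li : List String) : List String :=
  checkAuxA string arr arr num li

-- ===== PORT B =====
-- B's push loop `for j in reversed(sub): if j > t: stack.append(...)`; the Python stack grows and
-- pops at the right end, modelled as a Lean list with its top at the head (append = cons, pop = head).
def pushChildren (s : String) (sub : List Int) (t : Int)
    (stack : List (String × List Int × Int)) : List (String × List Int × Int) :=
  sub.reverse.foldl
    (fun st j =>
      if t < j then
        match PySem.List.index? sub j with
        | some jdx =>
          match PySem.List.pyGet? sub (jdx : Int) with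
          | some thr =>
            (s ++ PySem.Int.toStr j, PySem.List.slice sub (some (jdx : Int)) none, thr) :: st
          | none => st  -- unreachable: jdx is in range
        | none => st    -- unreachable: j ∈ sub
      else st)
    stack

-- termination measure for the while loop: an entry weighs 2·(r+1)! where r counts the elements of
-- its list above its threshold; each pushed child has strictly smaller r, so the total weight drops
def pvWt (e : String × List Int × Int) : Nat :=
  2 * Nat.factorial ((e.2.1.filter (fun x => decide (e.2.2 < x))).length + 1)

def pvMeas (stack : List (String × List Int × Int)) : Nat := (stack.map pvWt).sum

theorem pvWtChildLe (s : String) (sub : List Int) (t j : Int) (jdx : Nat) (thr : Int)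
    (h1 : PySem.List.index? sub j = some jdx) (h2 : PySem.List.pyGet? sub (jdx : Int) = some thr)
    (hj : t < j) :
    pvWt (s ++ PySem.Int.toStr j, PySem.List.slice sub (some (jdx : Int)) none, thr)
      ≤ 2 * Nat.factorial ((sub.filter (fun x => decide (t < x))).length) := by
  have hthr := pvGetIndexEq sub j jdx thr h1 h2
  subst hthr
  unfold pvWt
  simp only [PySem.List.slice_from_natCast]
  have hlt := pvRankDropLt sub thr t jdx h1 hj
  have hle : ((sub.drop jdx).filter (fun x => decide (thr < x))).length + 1
      ≤ (sub.filter (fun x => decide (t < x))).length := by omega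
  exact Nat.mul_le_mul_left 2 (Nat.factorial_le hle)

theorem pvMeasPushAux (s : String) (sub : List Int) (t : Int)
    (f : List (String × List Int × Int) → Int → List (String × List Int × Int))
    (hf : f = fun st j =>
      if t < j then
        match PySem.List.index? sub j with
        | some jdx =>
          match PySem.List.pyGet? sub (jdx : Int) with
          | some thr =>
            (s ++ PySem.Int.toStr j, PySem.List.slice sub (some (jdx : Int)) none, thr) :: st
          | none => st
        | none => st
      else st)
    (xs : List Int) (stack : List (String × List Int × Int)) :
    pvMeas (xs.foldl f stack)
      ≤ pvMeas stack
        + (xs.filter (fun x => decide (t < x))).length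
            * (2 * Nat.factorial ((sub.filter (fun x => decide (t < x))).length)) := by
  induction xs generalizing stack with
  | nil => simp
  | cons j xs ih =>
    rw [List.foldl_cons]
    by_cases hj : t < j
    · have hstep : pvMeas (f stack j)
          ≤ pvMeas stack + 2 * Nat.factorial ((sub.filter (fun x => decide (t < x))).length) := by
        simp only [hf]
        rw [if_pos hj]
        cases h1 : PySem.List.index? sub j with
        | none => simp [h1]
        | some jdx =>
          cases h2 : PySem.List.pyGet? sub (jdx : Int) with
          | none => simp [h1, h2]
          | some thr =>
            have hw := pvWtChildLe s sub t j jdx thr h1 h2 hj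
            simp only [h1, h2]
            simp only [pvMeas, List.map_cons, List.sum_cons]
            omega
      have hcnt : ((j :: xs).filter (fun x => decide (t < x))).length
          = (xs.filter (fun x => decide (t < x))).length + 1 := by
        simp [hj]
      rw [hcnt, Nat.succ_mul]
      have := ih (f stack j)
      omega
    · have hstep : f stack j = stack := by simp [hf, hj]
      have hcnt : ((j :: xs).filter (fun x => decide (t < x))).length
          = (xs.filter (fun x => decide (t < x))).length := by
        simp [hj]
      rw [hstep, hcnt]
      exact ih stack

-- popping an entry and pushing its children strictly decreases the stack weight
theorem pvMeasPushLt (s : String) (sub : List Int) (t : Int)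
    (rest : List (String × List Int × Int)) :
    pvMeas (pushChildren s sub t rest) < pvMeas ((s, sub, t) :: rest) := by
  have h := pvMeasPushAux s sub t _ rfl sub.reverse rest
  have hcount : (sub.reverse.filter (fun x => decide (t < x))).length
      = (sub.filter (fun x => decide (t < x))).length := by
    simp
  rw [hcount] at h
  set r := (sub.filter (fun x => decide (t < x))).length with hr
  have h2 : 0 < Nat.factorial r := Nat.factorial_pos r
  have hkey : r * (2 * Nat.factorial r) < 2 * Nat.factorial (r + 1) := by
    have h1 : Nat.factorial (r + 1) = (r + 1) * Nat.factorial r := rfl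
    have h3 : r * Nat.factorial r < (r + 1) * Nat.factorial r :=
      (Nat.mul_lt_mul_right h2).mpr (Nat.lt_succ_self r)
    calc r * (2 * Nat.factorial r) = 2 * (r * Nat.factorial r) := by ring
      _ < 2 * ((r + 1) * Nat.factorial r) := by omega
      _ = 2 * Nat.factorial (r + 1) := by rw [h1]
  have hwt : pvWt (s, sub, t) = 2 * Nat.factorial (r + 1) := rfl
  have hcons : pvMeas ((s, sub, t) :: rest) = 2 * Nat.factorial (r + 1) + pvMeas rest := by
    simp [pvMeas, hwt]
  unfold pushChildren
  omega

-- B's `while stack:` loop: pop an entry, append its string, push its children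
def bLoop (stack : List (String × List Int × Int)) (li : List String) : List String :=
  match stack with
  | [] => li
  | (s, sub, t) :: rest => bLoop (pushChildren s sub t rest) (li ++ [s])
termination_by pvMeas stack
decreasing_by
  exact pvMeasPushLt s sub t rest

def check_alt (string : String) (arr : List Int) (num : Int) (li : List String) : List String :=
  bLoop (pushChildren string arr num []) li

-- ===== PRECONDITION & SPEC =====
def Spec_check (string : String) (arr : List Int) (num : Int) (li : List String) (out : List String) : Prop := out = check_alt string arr num li
instance (string : String) (arr : List Int) (num : Int) (li : List String) (out : List String) : Decidable (Spec_check string arr num li out) := by unfold Spec_check; infer_instance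

-- ===== CLAIM (what is proved, stated in full; the proofs are below) =====
def Claim_equal_check : Prop := ∀ (string : String) (arr : List Int) (num : Int) (li : List String), Dom_check string arr num li → Spec_check string arr num li (check string arr num li)

-- ===== LEMMAS AND PROOFS =====

-- the strings A's recursion emits, without the accumulator
def emitA (string : String) (arr : List Int) (rest : List Int) (num : Int) : List String :=
  match rest with
  | [] => []
  | i :: rest' =>
    if hnum : num < i then
      let a := string ++ PySem.Int.toStr i
      match h1 : PySem.List.index? arr i with
      | some idx =>
        match h2 : PySem.List.pyGet? arr (idx : Int) with
        | some thr =>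
          let sub := PySem.List.slice arr (some (idx : Int)) none
          (a :: emitA a sub sub thr) ++ emitA string arr rest' num
        | none => emitA string arr rest' num
      | none => emitA string arr rest' num
    else emitA string arr rest' num
termination_by ((arr.filter (fun x => decide (num < x))).length, rest.length)
decreasing_by
  · apply Prod.Lex.left
    have hthr := pvGetIndexEq arr i idx thr h1 h2
    subst hthr
    rw [PySem.List.slice_from_natCast]
    exact pvRankDropLt arr thr num idx h1 hnum
  · apply Prod.Lex.right; simp
  · apply Prod.Lex.right; simp
  · apply Prod.Lex.right; simp
  · apply Prod.Lex.right; simp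

theorem checkAuxA_eq_emitA (string : String) (arr rest : List Int) (num : Int) (li : List String) :
    checkAuxA string arr rest num li = li ++ emitA string arr rest num := by
  induction string, arr, rest, num, li using checkAuxA.induct with
  | case1 => simp [checkAuxA, emitA]
  | case2 string arr num li i rest' hnum a idx h1 thr h2 sub li' ih1 ih1' ih2 =>
    rw [checkAuxA, emitA]
    simp only [hnum, dite_true]
    split <;> rename_i heq
    · rename_i idx'
      rw [h1] at heq
      injection heq with heq'
      subst heq'
      split <;> rename_i heq2
      · rename_i thr'
        rw [h2] at heq2
        injection heq2 with heq2'
        subst heq2'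
        rw [ih2]
        simp only [li', sub, a]
        rw [ih1']
        simp
      · rw [h2] at heq2; cases heq2
    · rw [h1] at heq; cases heq
  | case3 string arr num li i rest' hnum idx h1 h2 ih =>
    rw [checkAuxA, emitA]
    simp only [hnum, dite_true]
    split <;> rename_i heq
    · rename_i idx'
      rw [h1] at heq
      injection heq with heq'
      subst heq'
      split <;> rename_i heq2
      · rw [h2] at heq2; cases heq2
      · exact ih
    · rw [h1] at heq; cases heq
  | case4 string arr num li i rest' hnum h1 ih =>
    rw [checkAuxA, emitA]
    simp only [hnum, dite_true]
    split <;> rename_i heq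
    · rw [h1] at heq; cases heq
    · exact ih
  | case5 string arr num li i rest' hnum ih =>
    rw [checkAuxA, emitA]
    simp only [hnum, dite_false]
    exact ih

-- the in-order list of child stack entries of a node over list `sub` with threshold t, scanning `rest`
def childList (s : String) (sub : List Int) (rest : List Int) (t : Int) :
    List (String × List Int × Int) :=
  match rest with
  | [] => []
  | j :: rest' =>
    (if t < j then
      match PySem.List.index? sub j with
      | some jdx =>
        match PySem.List.pyGet? sub (jdx : Int) with
        | some thr =>
          [(s ++ PySem.Int.toStr j, PySem.List.slice sub (some (jdx : Int)) none, thr)]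
        | none => []
      | none => []
     else []) ++ childList s sub rest' t

theorem foldr_push_eq_childList (s : String) (sub : List Int) (t : Int)
    (rest : List Int) (stack : List (String × List Int × Int)) :
    rest.foldr
      (fun j st =>
        if t < j then
          match PySem.List.index? sub j with
          | some jdx =>
            match PySem.List.pyGet? sub (jdx : Int) with
            | some thr =>
              (s ++ PySem.Int.toStr j, PySem.List.slice sub (some (jdx : Int)) none, thr) :: st
            | none => st
          | none => st
        else st)
      stack
    = childList s sub rest t ++ stack := by
  induction rest with
  | nil => simp [childList]
  | cons j rest' ih =>
    rw [List.foldr_cons, ih, childList]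
    by_cases hj : t < j
    · rw [if_pos hj]
      cases h1 : PySem.List.index? sub j with
      | none => simp [h1]
      | some jdx =>
        cases h2 : PySem.List.pyGet? sub (jdx : Int) with
        | none => simp [h1, h2]
        | some thr => simp [h1, h2, hj]
    · simp [hj]

theorem pushChildren_eq_childList (s : String) (sub : List Int) (t : Int)
    (stack : List (String × List Int × Int)) :
    pushChildren s sub t stack = childList s sub sub t ++ stack := by
  unfold pushChildren
  rw [List.foldl_reverse]
  exact foldr_push_eq_childList s sub t sub stack

-- all the strings in the subtree of one stack entry, in A's order
def emitE (e : String × List Int × Int) : List String :=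
  e.1 :: emitA e.1 e.2.1 e.2.1 e.2.2

theorem emitA_eq_childList_flatMap (s : String) (sub : List Int) (rest : List Int) (t : Int) :
    emitA s sub rest t = (childList s sub rest t).flatMap emitE := by
  induction rest with
  | nil => simp [emitA, childList]
  | cons j rest' ih =>
    rw [emitA, childList]
    by_cases hj : t < j
    · simp only [hj, dite_true, if_pos hj]
      split <;> rename_i heq
      · rename_i jdx
        split <;> rename_i heq2
        · rename_i thr
          rw [PySem.List.index?_eq_idxOf?] at heq
          have heq2' : sub[jdx]? = some thr := by simpa using heq2
          simp only [heq, heq2', PySem.List.index?_eq_idxOf?, PySem.List.pyGet?_natCast]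
          rw [ih]
          simp [emitE]
        · rw [PySem.List.index?_eq_idxOf?] at heq
          have heq2' : sub[jdx]? = none := by simpa using heq2
          simp only [heq, heq2', PySem.List.index?_eq_idxOf?, PySem.List.pyGet?_natCast]
          simpa using ih
      · rw [PySem.List.index?_eq_idxOf?] at heq
        simp only [heq, PySem.List.index?_eq_idxOf?]
        simpa using ih
    · simp only [hj, dite_false, if_neg hj]
      simpa using ih

theorem bLoop_eq_flatMap (stack : List (String × List Int × Int)) (li : List String) :
    bLoop stack li = li ++ stack.flatMap emitE := by
  induction stack, li using bLoop.induct with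
  | case1 li => simp [bLoop]
  | case2 s sub t rest li ih =>
    rw [bLoop, ih, pushChildren_eq_childList]
    simp only [List.flatMap_append, List.flatMap_cons, emitE,
      ← emitA_eq_childList_flatMap]
    simp

-- ===== VERDICT (by name: the statement is the Claim_ definition above) =====
theorem check_spec : Claim_equal_check := by
  intro string arr num li _
  unfold Spec_check check check_alt
  rw [checkAuxA_eq_emitA, bLoop_eq_flatMap, pushChildren_eq_childList,
    List.append_nil, emitA_eq_childList_flatMap]
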